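-- pv_equiv track=rewrite | github.com/alkemyTech/OT281-python | bigdata/src/D_top10_preguntas_mayor_actividad.py | reduce_top10_activity_time
-- ===== SOURCE A (Python) =====
-- def reduce_top10_activity_time(data1, data2):
--     """
--     Reducer method that calculate the top 10 posts by activity_time.
--
--     Args:
--         data1 (dict): Dictionary 1 containing cumulative data.
--         data2 (dict): Dictionary 2 to extract data from.
--
--     Returns:
--         dict: Dictionary containing top 10 posts by activity_time.
--     """
--     #Add each item from data2 to data 1
--     #Since they are unique posts id, can't be duplicated keys
--     for key, value in data2.items():
--         data1.update({key : value})
--     #Order data1 dictionary by Activity time (values) in descending order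
--     ordered_data1 = dict(sorted(data1.items(), reverse=True, key=lambda item: item[1]))
--     #Stay only with top 10 items by activity time
--     if len(ordered_data1) > 10:
--         keys_to_delete = list(ordered_data1.keys())[10:]
--         for key in keys_to_delete:
--             del(ordered_data1[key])
--     #Return ordered data1 dictionary
--     return ordered_data1
-- ===== SOURCE B (Python) =====
-- def reduce_top10_activity_time(data1, data2):
--     """Merge data2 into data1 in place, then select the top 10 items by value
--     in one pass with a bounded insertion into a small descending list
--     (no full sort of the merged dict)."""
--     data1.update(data2)
--     top = []
--     for item in data1.items():
--         i = 0
--         while i < len(top) and top[i][1] >= item[1]: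
--             i += 1
--         top.insert(i, item)
--         if len(top) > 10:
--             top.pop()
--     return dict(top)
-- ===== Notes on version B (the rewrite author's own statement) =====
-- stated objective: alternative
-- what changed: B replaces A's full descending sort of all merged items plus dict rebuild and explicit key-deletion loop with a single pass that maintains a bounded (at most 10-element) descending list by positional insertion and trimming, so no full sort and no deletion pass exist in B (data1 is still mutated in place by the merge, as in A).
import Mathlib
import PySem

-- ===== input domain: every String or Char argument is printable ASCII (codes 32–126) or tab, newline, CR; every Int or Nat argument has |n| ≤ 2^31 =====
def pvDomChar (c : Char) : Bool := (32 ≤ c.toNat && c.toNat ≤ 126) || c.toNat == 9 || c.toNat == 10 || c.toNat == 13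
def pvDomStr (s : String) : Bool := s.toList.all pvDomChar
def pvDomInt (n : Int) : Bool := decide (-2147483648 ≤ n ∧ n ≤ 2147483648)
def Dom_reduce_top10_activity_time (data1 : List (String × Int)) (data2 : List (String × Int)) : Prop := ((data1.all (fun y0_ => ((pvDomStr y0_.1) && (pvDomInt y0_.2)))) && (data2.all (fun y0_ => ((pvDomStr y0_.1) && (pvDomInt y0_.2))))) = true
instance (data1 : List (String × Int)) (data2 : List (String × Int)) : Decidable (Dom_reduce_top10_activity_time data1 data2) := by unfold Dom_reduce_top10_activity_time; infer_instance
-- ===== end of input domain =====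

-- B replaces A's full descending sort + dict rebuild + key-deletion loop with a single pass
-- that maintains a bounded (≤ 10) descending list by insertion; both merge data2 into data1
-- in place (the equivalence proved here is about the return value; B performs the same mutation).

-- ===== PORT A =====
def reduce_top10_activity_time (data1 : List (String × Int)) (data2 : List (String × Int)) : List (String × Int) :=
  -- for key, value in data2.items(): data1.update({key : value})
  let d1 : PySem.Dict String Int := data2.foldl (fun d p => d.insert p.1 p.2) ⟨data1⟩
  -- ordered_data1 = dict(sorted(data1.items(), reverse=True, key=lambda item: item[1]))
  let ordered : PySem.Dict String Int :=
    PySem.Dict.ofList (PySem.List.sorted d1.items (fun p => p.2) true)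
  -- if len(ordered_data1) > 10: delete the keys listed at positions [10:]
  if 10 < PySem.Dict.size ordered then
    let keys_to_delete : List String := PySem.List.slice (PySem.Dict.keys ordered) (some 10) none
    (keys_to_delete.foldl (fun d k => d.erase k) ordered).items
  else
    ordered.items

-- ===== PORT B =====
-- the inner while/insert of Source B: walk past the entries with value >= item's, insert there
def pvInsertTop (x : String × Int) : List (String × Int) → List (String × Int)
  | [] => [x]
  | y :: ys => if y.2 ≥ x.2 then y :: pvInsertTop x ys else x :: y :: ys

-- if len(top) > 10: top.pop()
def pvTrimTop (t : List (String × Int)) : List (String × Int) :=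
  if 10 < t.length then t.dropLast else t

def reduce_top10_activity_time_alt (data1 : List (String × Int)) (data2 : List (String × Int)) : List (String × Int) :=
  -- data1.update(data2)
  let merged : PySem.Dict String Int := PySem.Dict.update ⟨data1⟩ data2
  -- for item in data1.items(): bounded insertion into 'top', trimmed to 10
  let top : List (String × Int) := merged.items.foldl (fun t x => pvTrimTop (pvInsertTop x t)) []
  -- return dict(top)
  (PySem.Dict.ofList top).items

-- ===== PRECONDITION & SPEC =====
-- Pre_ requires each association list to have pairwise-distinct keys: a Python dict can never
-- contain a duplicate key, so duplicate-key lists represent no input A can receive at all.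
def Pre_reduce_top10_activity_time (data1 : List (String × Int)) (data2 : List (String × Int)) : Prop :=
  (data1.map Prod.fst).Nodup ∧ (data2.map Prod.fst).Nodup
instance (data1 : List (String × Int)) (data2 : List (String × Int)) : Decidable (Pre_reduce_top10_activity_time data1 data2) := by unfold Pre_reduce_top10_activity_time; infer_instance
def pvWitness_reduce_top10_activity_time : (List (String × Int)) × (List (String × Int)) :=
  ([("a", 3), ("b", 1)], [("c", 2)])
def Spec_reduce_top10_activity_time (data1 : List (String × Int)) (data2 : List (String × Int)) (out : List (String × Int)) : Prop := out = reduce_top10_activity_time_alt data1 data2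
instance (data1 : List (String × Int)) (data2 : List (String × Int)) (out : List (String × Int)) : Decidable (Spec_reduce_top10_activity_time data1 data2 out) := by unfold Spec_reduce_top10_activity_time; infer_instance

-- ===== CLAIM (what is proved, stated in full; the proofs are below) =====
def Claim_equal_reduce_top10_activity_time : Prop := ∀ (data1 : List (String × Int)) (data2 : List (String × Int)), Dom_reduce_top10_activity_time data1 data2 → Pre_reduce_top10_activity_time data1 data2 → Spec_reduce_top10_activity_time data1 data2 (reduce_top10_activity_time data1 data2)

-- ===== LEMMAS AND PROOFS =====

-- Source B's hand-written insertion is PySem's insertBy with the reverse-stable 'before' test.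
theorem pvInsertTop_eq_insertBy (x : String × Int) (l : List (String × Int)) :
    pvInsertTop x l = PySem.List.insertBy (fun a b => decide (b.2 < a.2)) x l := by
  induction l with
  | nil => rfl
  | cons y ys ih =>
    by_cases h : y.2 ≥ x.2
    · simp [pvInsertTop, PySem.List.insertBy, h, not_lt.mpr h, ih]
    · simp [pvInsertTop, PySem.List.insertBy, h, lt_of_not_ge h]

-- trimming after inserting into the 10-prefix = taking the 10-prefix after inserting
theorem trim_insert_take (x : String × Int) (acc : List (String × Int)) (n : Nat) :
    (if n < (pvInsertTop x (acc.take n)).length then (pvInsertTop x (acc.take n)).dropLast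
     else pvInsertTop x (acc.take n)) = (pvInsertTop x acc).take n := by
  induction acc generalizing n with
  | nil =>
    cases n with
    | zero => simp [pvInsertTop]
    | succ m => simp [pvInsertTop]
  | cons y ys ih =>
    cases n with
    | zero => simp [pvInsertTop]
    | succ m =>
      simp only [List.take_succ_cons]
      by_cases h : y.2 ≥ x.2
      · -- skip y, recurse
        have hne : pvInsertTop x (ys.take m) ≠ [] := by
          cases ys.take m with
          | nil => simp [pvInsertTop]
          | cons a t => simp [pvInsertTop]; split <;> simp
        have hlen : (pvInsertTop x (y :: ys.take m)).length
            = (pvInsertTop x (ys.take m)).length + 1 := by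
          simp [pvInsertTop, h]
        simp only [pvInsertTop, if_pos h, List.take_succ_cons]
        rw [show (y :: pvInsertTop x (ys.take m)).length = (pvInsertTop x (ys.take m)).length + 1 by simp]
        by_cases hc : m < (pvInsertTop x (ys.take m)).length
        · rw [if_pos (by omega), List.dropLast_cons_of_ne_nil hne]
          rw [← ih m, if_pos hc]
        · rw [if_neg (by omega), ← ih m, if_neg hc]
      · -- x goes in front
        simp only [pvInsertTop, if_neg h]
        cases m with
        | zero => simp
        | succ k =>
          by_cases hk : k < ys.length
          · have h1 : (ys.take (k+1)).dropLast = ys.take k := by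
              rw [List.dropLast_eq_take, List.take_take, List.length_take]
              congr 1
              omega
            rw [if_pos (by simp only [List.length_cons, List.length_take]; omega)]
            rw [List.dropLast_cons_of_ne_nil (by simp),
                List.dropLast_cons_of_ne_nil (by
                  have hys : ys ≠ [] := List.ne_nil_of_length_pos (by omega)
                  simp [List.take_eq_nil_iff, hys])]
            simp [h1]
          · have he : ys.take (k+1) = ys := List.take_of_length_le (by omega)
            rw [he, if_neg (by simp only [List.length_cons]; omega)]
            rw [List.take_of_length_le (by simp only [List.length_cons]; omega)]

-- the whole B loop computes the 10-prefix of the untrimmed insertion fold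
theorem foldl_trim_eq_take (l acc : List (String × Int)) :
    l.foldl (fun t x => pvTrimTop (pvInsertTop x t)) (acc.take 10)
      = (l.foldl (fun acc x => pvInsertTop x acc) acc).take 10 := by
  induction l generalizing acc with
  | nil => rfl
  | cons x xs ih =>
    simp only [List.foldl_cons]
    rw [show pvTrimTop (pvInsertTop x (acc.take 10))
          = (pvInsertTop x acc).take 10 from trim_insert_take x acc 10]
    rw [← ih (pvInsertTop x acc)]

-- B's top list is the first 10 items of the stable descending sort
theorem top_eq_sorted_take (l : List (String × Int)) :
    l.foldl (fun t x => pvTrimTop (pvInsertTop x t)) []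
      = (PySem.List.sorted l (fun p => p.2) true).take 10 := by
  have h0 : ([] : List (String × Int)) = ([] : List (String × Int)).take 10 := rfl
  rw [h0, foldl_trim_eq_take l []]
  rw [PySem.List.sorted_rev_eq_foldl_insertBy]
  congr 1
  apply PySem.List.foldl_congr_mem
  intro acc x _
  exact pvInsertTop_eq_insertBy x acc

-- dict(pairs) on a duplicate-free pair list keeps exactly that list as its items.
theorem ofList_items_of_nodup (l : List (String × Int)) (h : (l.map Prod.fst).Nodup) :
    (PySem.Dict.ofList l).items = l := by
  show ((PySem.Dict.empty : PySem.Dict String Int).update l).items = l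
  unfold PySem.Dict.update
  rw [PySem.Dict.items_foldl_insert_fresh l Prod.fst Prod.snd PySem.Dict.empty
        (fun a _ => PySem.Dict.contains_empty a.1) h]
  simp [PySem.Dict.empty]

-- Deleting, one by one, the keys of the tail u from the dict whose items are t ++ u
-- leaves exactly the dict whose items are t (all keys pairwise distinct).
theorem erase_tail_loop (u t : List (String × Int)) (h : ((t ++ u).map Prod.fst).Nodup) :
    (u.map Prod.fst).foldl (fun (d : PySem.Dict String Int) k => d.erase k) ⟨t ++ u⟩ = ⟨t⟩ := by
  induction u generalizing t with
  | nil => simp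
  | cons p u ih =>
    have hnd2 : (p.1 :: ((t ++ u).map Prod.fst)).Nodup := by
      have h' : ((t.map Prod.fst) ++ p.1 :: (u.map Prod.fst)).Nodup := by simpa using h
      simpa using List.perm_middle.nodup h'
    have hp1 : p.1 ∉ (t ++ u).map Prod.fst := (List.nodup_cons.mp hnd2).1
    have hkeys : ∀ q ∈ t ++ u, q.1 ≠ p.1 := fun q hq e => hp1 (e ▸ List.mem_map_of_mem hq)
    have hstep : (PySem.Dict.erase (⟨t ++ p :: u⟩ : PySem.Dict String Int) p.1) = ⟨t ++ u⟩ := by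
      unfold PySem.Dict.erase
      congr 1
      rw [List.filter_append, List.filter_cons]
      have h1 : t.filter (fun q => !(q.1 == p.1)) = t :=
        List.filter_eq_self.mpr (fun q hq => by simpa using hkeys q (List.mem_append_left _ hq))
      have h2 : u.filter (fun q => !(q.1 == p.1)) = u :=
        List.filter_eq_self.mpr (fun q hq => by simpa using hkeys q (List.mem_append_right _ hq))
      simp [h1, h2]
    simp only [List.map_cons, List.foldl_cons, hstep]
    exact ih t ((((List.sublist_cons_self p u).append_left t).map Prod.fst).nodup h)

theorem merged_items_keys_nodup (data1 data2 : List (String × Int))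
    (hpre : Pre_reduce_top10_activity_time data1 data2) :
    ((data2.foldl (fun (d : PySem.Dict String Int) p => d.insert p.1 p.2) ⟨data1⟩).items.map Prod.fst).Nodup := by
  have h0 : (PySem.Dict.keys (⟨data1⟩ : PySem.Dict String Int)).Nodup := by
    simpa [PySem.Dict.keys] using hpre.1
  simpa [PySem.Dict.keys] using
    PySem.Dict.nodup_keys_foldl_insert_key data2 Prod.fst (fun _ p => p.2) ⟨data1⟩ h0

-- A's tail: on a duplicate-key-free dict m, sort + dict + delete-keys-past-10
-- produces exactly the first 10 items of the stable descending sort.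
theorem a_side_take10 (m : PySem.Dict String Int) (hm : (m.items.map Prod.fst).Nodup) :
    (if 10 < PySem.Dict.size (PySem.Dict.ofList (PySem.List.sorted m.items (fun p => p.2) true)) then
      ((PySem.List.slice (PySem.Dict.keys (PySem.Dict.ofList (PySem.List.sorted m.items (fun p => p.2) true))) (some 10) none).foldl
          (fun d k => d.erase k) (PySem.Dict.ofList (PySem.List.sorted m.items (fun p => p.2) true))).items
    else (PySem.Dict.ofList (PySem.List.sorted m.items (fun p => p.2) true)).items)
      = (PySem.List.sorted m.items (fun p => p.2) true).take 10 := by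
  set s : List (String × Int) := PySem.List.sorted m.items (fun p => p.2) true
  have hnod : (s.map Prod.fst).Nodup :=
    (((PySem.List.sorted_perm m.items (fun p => p.2) true).map Prod.fst).nodup_iff).mpr hm
  have hitems : (PySem.Dict.ofList s).items = s := ofList_items_of_nodup s hnod
  have hdict : PySem.Dict.ofList s = (⟨s⟩ : PySem.Dict String Int) := PySem.Dict.ext hitems
  rw [hdict]
  by_cases hlen : 10 < s.length
  · rw [if_pos (by simpa [PySem.Dict.size] using hlen)]
    have hkeys : PySem.List.slice (PySem.Dict.keys (⟨s⟩ : PySem.Dict String Int)) (some 10) none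
        = (s.drop 10).map Prod.fst := by
      rw [PySem.List.slice_from _ (by norm_num)]
      simp [PySem.Dict.keys, List.map_drop]
    rw [hkeys]
    have htu : s.take 10 ++ s.drop 10 = s := List.take_append_drop 10 s
    have hloop := erase_tail_loop (s.drop 10) (s.take 10) (by rwa [htu])
    rw [show (⟨s⟩ : PySem.Dict String Int) = ⟨s.take 10 ++ s.drop 10⟩ from by rw [htu], hloop]
  · rw [if_neg (by simpa [PySem.Dict.size] using hlen)]
    rw [List.take_of_length_le (by omega)]

-- ===== VERDICT (by name: the statement is the Claim_ definition above) =====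
theorem reduce_top10_activity_time_spec : Claim_equal_reduce_top10_activity_time := by
  intro data1 data2 _ hpre
  unfold Spec_reduce_top10_activity_time reduce_top10_activity_time reduce_top10_activity_time_alt
  dsimp only []
  have hmerge : PySem.Dict.update (⟨data1⟩ : PySem.Dict String Int) data2
      = data2.foldl (fun d p => d.insert p.1 p.2) ⟨data1⟩ := rfl
  rw [hmerge]
  set m : PySem.Dict String Int := data2.foldl (fun d p => d.insert p.1 p.2) ⟨data1⟩ with hm
  have hnodm : (m.items.map Prod.fst).Nodup := merged_items_keys_nodup data1 data2 hpre
  rw [a_side_take10 m hnodm, top_eq_sorted_take m.items]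
  set s10 := (PySem.List.sorted m.items (fun p => p.2) true).take 10
  have hnods : (s10.map Prod.fst).Nodup := by
    have : ((PySem.List.sorted m.items (fun p => p.2) true).map Prod.fst).Nodup :=
      (((PySem.List.sorted_perm m.items (fun p => p.2) true).map Prod.fst).nodup_iff).mpr hnodm
    simpa [s10, List.map_take] using (((PySem.List.sorted m.items (fun p => p.2) true).map Prod.fst).take_sublist 10).nodup this
  exact (ofList_items_of_nodup s10 hnods).symm
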